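-- pv_equiv track=rewrite | github.com/balibabu/Timeline | 2023/06_June/HoneyComb/level5.py | getCommonPoint
-- ===== SOURCE A (Python) =====
-- def getCommonPoint(path,paths):
--     commonStep=None
--     for step in path:
--         c=0
--         for path in paths:
--             if step not in path:
--                 c=1
--                 break
--         if c==0:
--             commonStep=step
--             break
--     return commonStep
-- ===== SOURCE B (Python) =====
-- def getCommonPoint(path, paths):
--     if not paths:
--         return path[0] if path else None
--     common = set(paths[0])
--     for p in paths[1:]:
--         common &= set(p)
--     for step in path:
--         if step in common:
--             return step
--     return None
-- ===== Notes on version B (the rewrite author's own statement) =====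
-- stated objective: faster
-- what changed: Instead of re-scanning every list in paths for each step, B precomputes the set intersection of all paths once and then does a single scan of path with O(1) membership tests.
import Mathlib
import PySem

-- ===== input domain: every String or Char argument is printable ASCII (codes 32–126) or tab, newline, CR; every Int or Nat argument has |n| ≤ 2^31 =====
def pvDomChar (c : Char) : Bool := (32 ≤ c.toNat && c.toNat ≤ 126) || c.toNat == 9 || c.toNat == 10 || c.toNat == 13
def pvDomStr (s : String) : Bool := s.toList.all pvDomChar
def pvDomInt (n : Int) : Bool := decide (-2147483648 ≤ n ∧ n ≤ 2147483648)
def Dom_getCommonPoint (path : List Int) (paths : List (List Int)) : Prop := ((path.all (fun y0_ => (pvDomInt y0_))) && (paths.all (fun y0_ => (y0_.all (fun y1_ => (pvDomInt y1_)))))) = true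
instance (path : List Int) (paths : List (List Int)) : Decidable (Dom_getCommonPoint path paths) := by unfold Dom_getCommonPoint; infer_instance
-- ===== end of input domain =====

-- B precomputes the intersection set of all paths once and scans path once (faster); A rescans all paths per step.

-- ===== PORT A =====
-- inner 'for path in paths: if step not in path: c=1; break' — returns the final value of c
def pvACheck (step : Int) : List (List Int) → Int
  | [] => 0
  | p :: rest => if !(p.contains step) then 1 else pvACheck step rest

-- outer 'for step in path: …; if c==0: commonStep=step; break'
def pvALoop (paths : List (List Int)) : List Int → Option Int
  | [] => none
  | step :: rest => if pvACheck step paths = 0 then some step else pvALoop paths rest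

def getCommonPoint (path : List Int) (paths : List (List Int)) : Option Int :=
  pvALoop paths path

-- ===== PORT B =====
def getCommonPoint_alt (path : List Int) (paths : List (List Int)) : Option Int :=
  match paths with
  | [] => path.head?
  | p :: rest =>
    let common := rest.foldl (fun acc q => PySem.Set.inter acc (PySem.Set.ofList q)) (PySem.Set.ofList p)
    path.find? (fun step => PySem.Set.contains common step)

-- ===== PRECONDITION & SPEC =====
def Spec_getCommonPoint (path : List Int) (paths : List (List Int)) (out : Option Int) : Prop := out = getCommonPoint_alt path paths
instance (path : List Int) (paths : List (List Int)) (out : Option Int) : Decidable (Spec_getCommonPoint path paths out) := by unfold Spec_getCommonPoint; infer_instance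

-- ===== CLAIM (what is proved, stated in full; the proofs are below) =====
def Claim_equal_getCommonPoint : Prop := ∀ (path : List Int) (paths : List (List Int)), Dom_getCommonPoint path paths → Spec_getCommonPoint path paths (getCommonPoint path paths)

-- ===== LEMMAS AND PROOFS =====

theorem pvACheck_eq_zero (step : Int) (ps : List (List Int)) :
    pvACheck step ps = 0 ↔ ∀ p ∈ ps, step ∈ p := by
  induction ps with
  | nil => simp [pvACheck]
  | cons p rest ih =>
    by_cases h : step ∈ p <;> simp [pvACheck, h, ih]

theorem mem_foldl_inter (x : Int) (rest : List (List Int)) (acc : List Int) :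
    x ∈ rest.foldl (fun a q => PySem.Set.inter a (PySem.Set.ofList q)) acc ↔
      x ∈ acc ∧ ∀ q ∈ rest, x ∈ q := by
  induction rest generalizing acc with
  | nil => simp
  | cons q rest ih =>
    simp only [List.foldl_cons, ih, PySem.Set.mem_inter, PySem.Set.mem_ofList,
      List.mem_cons]
    constructor
    · rintro ⟨⟨hx, hq⟩, hall⟩
      exact ⟨hx, by rintro q' (rfl | hq') <;> [exact hq; exact hall q' hq']⟩
    · rintro ⟨hx, hall⟩
      exact ⟨⟨hx, hall q (Or.inl rfl)⟩, fun q' hq' => hall q' (Or.inr hq')⟩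

theorem pvALoop_eq_find? (paths : List (List Int)) (pred : Int → Bool)
    (hpred : ∀ s : Int, pvACheck s paths = 0 ↔ pred s = true) (l : List Int) :
    pvALoop paths l = l.find? pred := by
  induction l with
  | nil => simp [pvALoop]
  | cons s rest ih =>
    simp only [pvALoop, List.find?]
    by_cases h : pvACheck s paths = 0
    · simp [h, (hpred s).mp h]
    · have : pred s = false := by
        cases hps : pred s
        · rfl
        · exact absurd ((hpred s).mpr hps) h
      simp [h, this, ih]

-- ===== VERDICT (by name: the statement is the Claim_ definition above) =====
theorem getCommonPoint_spec : Claim_equal_getCommonPoint := by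
  intro path paths _
  unfold Spec_getCommonPoint getCommonPoint getCommonPoint_alt
  match paths with
  | [] =>
    rw [pvALoop_eq_find? [] (fun _ => true) (by simp [pvACheck])]
    induction path with
    | nil => rfl
    | cons s rest ih => simp [List.find?]
  | p :: rest =>
    simp only
    apply pvALoop_eq_find?
    intro s
    rw [pvACheck_eq_zero]
    rw [PySem.Set.contains_iff]
    rw [mem_foldl_inter]
    simp [PySem.Set.mem_ofList]
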